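-- pv_equiv track=rewrite | github.com/SentientExplosive/random-code | file_reader/file_reader.py | frequency_finder
-- ===== SOURCE A (Python) =====
-- def frequency_finder(list1, list2, shared_list):
--     '''Finds the frequency of the words shared between the given lists.'''
--     # Initialize the frequency dictionary
--     frequency = {}
--     for word in shared_list:
--         frequency[word] = 0
--
--     # Iterate through list 1
--     for key in shared_list:
--         for word in list1:
--             if key == word:
--                 frequency[key] += 1
--
--     # Iterate through list 2
--     for key in shared_list:
--         for word in list2:
--             if key == word:
--                 frequency[key] += 1
--
--     return frequency
-- ===== SOURCE B (Python) =====
-- def frequency_finder(list1, list2, shared_list):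
--     '''Finds the frequency of the words shared between the given lists.'''
--     # Count every word of both lists once, up front.
--     counts = {}
--     for w in list1:
--         counts[w] = counts.get(w, 0) + 1
--     for w in list2:
--         counts[w] = counts.get(w, 0) + 1
--
--     # Initialize and fill the result from the precomputed counts.
--     frequency = {}
--     for w in shared_list:
--         frequency[w] = 0
--     for key in shared_list:
--         frequency[key] += counts.get(key, 0)
--     return frequency
-- ===== Notes on version B (the rewrite author's own statement) =====
-- stated objective: faster
-- what changed: B builds a count dictionary of list1 and list2 in one pass each and then fills the result by dictionary lookup per shared word, replacing A's rescans of both lists for every shared word.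
import Mathlib
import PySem

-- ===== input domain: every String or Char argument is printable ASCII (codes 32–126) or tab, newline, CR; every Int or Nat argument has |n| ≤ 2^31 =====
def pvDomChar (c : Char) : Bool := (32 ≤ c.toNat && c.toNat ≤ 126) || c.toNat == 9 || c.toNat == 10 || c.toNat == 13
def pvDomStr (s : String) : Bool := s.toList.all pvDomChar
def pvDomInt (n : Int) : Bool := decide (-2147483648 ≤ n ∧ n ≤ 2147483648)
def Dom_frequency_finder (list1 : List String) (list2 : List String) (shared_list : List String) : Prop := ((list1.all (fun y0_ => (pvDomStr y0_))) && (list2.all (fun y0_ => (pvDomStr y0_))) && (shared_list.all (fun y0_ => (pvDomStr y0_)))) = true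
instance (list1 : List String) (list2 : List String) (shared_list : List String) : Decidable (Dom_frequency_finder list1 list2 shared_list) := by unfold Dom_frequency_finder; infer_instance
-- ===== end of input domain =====

-- B replaces A's per-shared-word rescans of both lists by one counting pass over each list plus a lookup per shared word (faster).


-- ===== PORT A =====
-- 'frequency[key] += 1' is ported as 'd.modify key 0 (· + 1)': key is always present
-- (every key of shared_list was inserted first), so the default 0 is never used.
def frequency_finder (list1 : List String) (list2 : List String) (shared_list : List String) : List (String × Int) :=
  let frequency : PySem.Dict String Int :=
    shared_list.foldl (fun d word => d.insert word 0) PySem.Dict.empty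
  let frequency :=
    shared_list.foldl (fun d key =>
      list1.foldl (fun d word => if key == word then d.modify key 0 (· + 1) else d) d) frequency
  let frequency :=
    shared_list.foldl (fun d key =>
      list2.foldl (fun d word => if key == word then d.modify key 0 (· + 1) else d) d) frequency
  frequency.items

-- ===== PORT B =====
-- 'counts[w] = counts.get(w, 0) + 1' is 'd.insert w (d.getD w 0 + 1)';
-- 'frequency[key] += counts.get(key, 0)' is 'd.modify key 0 (· + counts.getD key 0)' (key always present).
def frequency_finder_alt (list1 : List String) (list2 : List String) (shared_list : List String) : List (String × Int) :=
  let counts : PySem.Dict String Int :=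
    list2.foldl (fun d w => d.insert w (d.getD w 0 + 1))
      (list1.foldl (fun d w => d.insert w (d.getD w 0 + 1)) PySem.Dict.empty)
  let frequency : PySem.Dict String Int :=
    shared_list.foldl (fun d w => d.insert w 0) PySem.Dict.empty
  let frequency :=
    shared_list.foldl (fun d key => d.modify key 0 (· + counts.getD key 0)) frequency
  frequency.items

-- ===== PRECONDITION & SPEC =====
def Spec_frequency_finder (list1 : List String) (list2 : List String) (shared_list : List String) (out : List (String × Int)) : Prop := out = frequency_finder_alt list1 list2 shared_list
instance (list1 : List String) (list2 : List String) (shared_list : List String) (out : List (String × Int)) : Decidable (Spec_frequency_finder list1 list2 shared_list out) := by unfold Spec_frequency_finder; infer_instance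

-- ===== CLAIM (what is proved, stated in full; the proofs are below) =====
def Claim_equal_frequency_finder : Prop := ∀ (list1 : List String) (list2 : List String) (shared_list : List String), Dom_frequency_finder list1 list2 shared_list → Spec_frequency_finder list1 list2 shared_list (frequency_finder list1 list2 shared_list)

-- ===== LEMMAS AND PROOFS =====

-- updating a set with elements it already holds changes nothing
theorem pv_set_update_subset (l s : List String) (h : ∀ x ∈ l, x ∈ s) :
    PySem.Set.update s l = s := by
  induction l generalizing s with
  | nil => rfl
  | cons w l ih =>
      have hw : w ∈ s := h w (by simp)
      simp only [PySem.Set.update, List.foldl_cons, PySem.Set.add, PySem.Set.contains]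
      rw [if_pos (by simpa using hw)]
      exact ih s (fun x hx => h x (by simp [hx]))

-- the zero-initialisation dict reads 0 everywhere (value 0 if present, default 0 if not)
theorem pv_init_getD (sh : List String) (d : PySem.Dict String Int) (k : String)
    (h : d.getD k 0 = 0) :
    (sh.foldl (fun d w => d.insert w 0) d).getD k 0 = 0 := by
  induction sh generalizing d with
  | nil => simpa using h
  | cons w sh ih =>
      simp only [List.foldl_cons]
      exact ih _ (by rw [PySem.Dict.getD_insert]; split <;> simp [h])

-- A's inner loop over a data list: only the entry at `key` changes, by the count of `key`
theorem pv_innerA_getD (l : List String) (key : String) (d : PySem.Dict String Int) (k : String) :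
    (l.foldl (fun d word => if key == word then d.modify key 0 (· + 1) else d) d).getD k 0
      = d.getD k 0 + if k = key then (l.count key : Int) else 0 := by
  induction l generalizing d with
  | nil => simp
  | cons w l ih =>
      simp only [List.foldl_cons]
      by_cases hw : key = w
      · subst hw
        rw [if_pos (by simp)]
        rw [ih, PySem.Dict.getD_modify]
        by_cases hk : k = key
        · subst hk
          simp only [List.count_cons_self]
          push_cast
          ring
        · simp [hk]
      · rw [if_neg (by simpa using hw)]
        rw [ih]
        have hcnt : (w :: l).count key = l.count key := by
          simp [Ne.symm hw]
        rw [hcnt]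

-- A's inner loop preserves the key list when `key` is already a key
theorem pv_innerA_keys (l : List String) (key : String) (d : PySem.Dict String Int)
    (h : key ∈ d.keys) :
    (l.foldl (fun d word => if key == word then d.modify key 0 (· + 1) else d) d).keys = d.keys := by
  induction l generalizing d with
  | nil => rfl
  | cons w l ih =>
      simp only [List.foldl_cons]
      by_cases hw : key = w
      · rw [if_pos (by simp [hw])]
        have hkeys : (d.modify key 0 (· + 1)).keys = d.keys := by
          rw [PySem.Dict.keys_modify,
            PySem.Dict.keys_insert_of_contains _ _ ((PySem.Dict.contains_iff_mem_keys _ _).mpr h)]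
        rw [ih _ (by rw [hkeys]; exact h), hkeys]
      · rw [if_neg (by simpa using hw)]
        exact ih d h

-- A's whole phase over shared_list: each entry grows by count-in-shared × count-in-list
theorem pv_phaseA_getD (sh l : List String) (d : PySem.Dict String Int) (k : String) :
    (sh.foldl (fun d key =>
        l.foldl (fun d word => if key == word then d.modify key 0 (· + 1) else d) d) d).getD k 0
      = d.getD k 0 + (sh.count k : Int) * (l.count k : Int) := by
  induction sh generalizing d with
  | nil => simp
  | cons key sh ih =>
      simp only [List.foldl_cons]
      rw [ih, pv_innerA_getD]
      by_cases hk : k = key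
      · subst hk; simp; ring
      · simp [hk, Ne.symm hk]
  
theorem pv_phaseA_keys (sh l : List String) (d : PySem.Dict String Int)
    (h : ∀ key ∈ sh, key ∈ d.keys) :
    (sh.foldl (fun d key =>
        l.foldl (fun d word => if key == word then d.modify key 0 (· + 1) else d) d) d).keys
      = d.keys := by
  induction sh generalizing d with
  | nil => rfl
  | cons key sh ih =>
      simp only [List.foldl_cons]
      have hkeys := pv_innerA_keys l key d (h key (by simp))
      rw [ih _ (fun x hx => by rw [hkeys]; exact h x (by simp [hx])), hkeys]

-- B's fill loop: each entry grows by count-in-shared × the looked-up count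
theorem pv_phaseB_getD (sh : List String) (c : PySem.Dict String Int)
    (d : PySem.Dict String Int) (k : String) :
    (sh.foldl (fun d key => d.modify key 0 (· + c.getD key 0)) d).getD k 0
      = d.getD k 0 + (sh.count k : Int) * c.getD k 0 := by
  induction sh generalizing d with
  | nil => simp
  | cons key sh ih =>
      simp only [List.foldl_cons]
      rw [ih, PySem.Dict.getD_modify]
      by_cases hk : k = key
      · subst hk; simp; ring
      · simp [hk, Ne.symm hk]

-- ===== VERDICT (by name: the statement is the Claim_ definition above) =====
theorem frequency_finder_spec : Claim_equal_frequency_finder := by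
  intro list1 list2 shared_list _
  show frequency_finder list1 list2 shared_list = frequency_finder_alt list1 list2 shared_list
  unfold frequency_finder frequency_finder_alt
  set f0 : PySem.Dict String Int :=
    shared_list.foldl (fun d w => d.insert w 0) PySem.Dict.empty with hf0
  have hkeys0 : f0.keys = PySem.Set.update [] shared_list := by
    rw [hf0, PySem.Dict.keys_foldl_insert, PySem.Dict.keys_empty]
  have hmem : ∀ key ∈ shared_list, key ∈ f0.keys := by
    intro key hk
    rw [hkeys0]
    have : PySem.Set.update ([] : List String) shared_list = PySem.Set.ofList shared_list := rfl
    rw [this]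
    exact (PySem.Set.mem_ofList _ _).mpr hk
  have hnodup : f0.keys.Nodup := by
    rw [hf0]
    exact PySem.Dict.nodup_keys_foldl_insert _ _ _ (by simp [PySem.Dict.keys_empty])
  -- keys of both final dicts are f0.keys
  have hkA1 := pv_phaseA_keys shared_list list1 f0 hmem
  have hkA2 := pv_phaseA_keys shared_list list2 _ (fun x hx => by rw [hkA1]; exact hmem x hx)
  have hkB : (shared_list.foldl (fun d key =>
      d.modify key 0 (· + (list2.foldl (fun d w => d.insert w (d.getD w 0 + 1))
        (list1.foldl (fun d w => d.insert w (d.getD w 0 + 1)) PySem.Dict.empty)).getD key 0)) f0).keys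
      = f0.keys := by
    rw [PySem.Dict.keys_foldl_modify]
    exact pv_set_update_subset _ _ (fun x hx => hmem x hx)
  -- compare items via keys + pointwise getD
  rw [PySem.Dict.items_eq_map_keys _ (by rw [hkA2, hkA1]; exact hnodup) 0,
      PySem.Dict.items_eq_map_keys _ (by rw [hkB]; exact hnodup) 0,
      hkA2, hkA1, hkB]
  apply List.map_congr_left
  intro k _
  have hc : (list2.foldl (fun d w => d.insert w (d.getD w 0 + 1))
      (list1.foldl (fun d w => d.insert w (d.getD w 0 + 1)) PySem.Dict.empty)).getD k 0
      = (list1.count k : Int) + (list2.count k : Int) := by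
    rw [PySem.Dict.getD_foldl_insert_add_one, PySem.Dict.getD_foldl_insert_add_one,
        PySem.Dict.getD_empty]
    ring
  have h0 : f0.getD k 0 = 0 := pv_init_getD shared_list _ k (by simp [PySem.Dict.getD_empty])
  rw [pv_phaseA_getD, pv_phaseA_getD, pv_phaseB_getD, hc, h0]
  simp
  ring
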